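-- pv_equiv track=rewrite | github.com/daksh1403/mdp | backend/drone_controller.py | group_cells_by_row
-- ===== SOURCE A (Python) =====
-- def group_cells_by_row(cells):
--     """
--     Group cells by row for continuous painting.
--     Returns dict: {row_number: [col1, col2, ...]} sorted.
--     """
--     rows = {}
--     for row, col in cells:
--         if row not in rows:
--             rows[row] = []
--         rows[row].append(col)
--     # Sort columns within each row
--     for r in rows:
--         rows[r].sort()
--     return dict(sorted(rows.items()))
-- ===== SOURCE B (Python) =====
-- def group_cells_by_row(cells):
--     """
--     Group cells by row for continuous painting.
--     Returns dict: {row_number: [col1, col2, ...]} sorted.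
--     """
--     out = {}
--     for row, col in sorted(cells):
--         out.setdefault(row, []).append(col)
--     return out
-- ===== Notes on version B (the rewrite author's own statement) =====
-- stated objective: idiomatic
-- what changed: Instead of building an unsorted per-row dict and then sorting each column list and finally sorting the dict items, B sorts all cells once by (row, col) and does a single setdefault-append grouping pass, which yields sorted rows and sorted columns directly.
import Mathlib
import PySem

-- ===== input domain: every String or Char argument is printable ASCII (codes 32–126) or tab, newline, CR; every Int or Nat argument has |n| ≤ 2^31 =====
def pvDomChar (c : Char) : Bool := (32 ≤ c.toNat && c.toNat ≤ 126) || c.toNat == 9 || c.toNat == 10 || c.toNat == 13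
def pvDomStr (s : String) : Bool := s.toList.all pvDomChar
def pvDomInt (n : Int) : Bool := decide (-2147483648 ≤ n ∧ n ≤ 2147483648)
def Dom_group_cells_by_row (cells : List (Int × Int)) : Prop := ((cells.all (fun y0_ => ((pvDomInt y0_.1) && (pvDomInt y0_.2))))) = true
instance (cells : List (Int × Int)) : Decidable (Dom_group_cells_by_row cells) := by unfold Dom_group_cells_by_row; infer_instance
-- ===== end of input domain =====

-- B replaces A's build-then-sort-twice shape (unsorted dict, a per-row column sort, a final
-- sort of the items) by one global sort of the cells followed by a single grouping pass.

-- ===== PORT A =====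
def group_cells_by_row (cells : List (Int × Int)) : List (Int × List Int) :=
  let rows : PySem.Dict Int (List Int) :=
    cells.foldl (fun rows rc =>
      let rows := if rows.contains rc.1 then rows else rows.insert rc.1 []
      rows.modify rc.1 [] (fun l => l ++ [rc.2])) (PySem.Dict.mk [])
  let rows := rows.keys.foldl
      (fun d r => d.modify r [] (fun l => PySem.List.sorted l (fun x => x))) rows
  -- dict keys are pairwise distinct, so Python's tuple comparison in sorted(rows.items())
  -- only ever compares the keys: sorting by the key alone is exact here
  PySem.List.sorted rows.items (fun p => p.1)

-- ===== PORT B =====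
def group_cells_by_row_alt (cells : List (Int × Int)) : List (Int × List Int) :=
  -- sorted(cells) compares int pairs lexicographically: key = the Lex order on Int × Int
  ((PySem.List.sorted cells (fun p => (toLex p : Lex (Int × Int)))).foldl
    (fun (out : PySem.Dict Int (List Int)) rc => out.modify rc.1 [] (fun l => l ++ [rc.2]))
    (PySem.Dict.mk [])).items

-- ===== PRECONDITION & SPEC =====
def Spec_group_cells_by_row (cells : List (Int × Int)) (out : List (Int × List Int)) : Prop := out = group_cells_by_row_alt cells
instance (cells : List (Int × Int)) (out : List (Int × List Int)) : Decidable (Spec_group_cells_by_row cells out) := by unfold Spec_group_cells_by_row; infer_instance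

-- ===== CLAIM (what is proved, stated in full; the proofs are below) =====
def Claim_equal_group_cells_by_row : Prop := ∀ (cells : List (Int × Int)), Dom_group_cells_by_row cells → Spec_group_cells_by_row cells (group_cells_by_row cells)

-- ===== LEMMAS AND PROOFS =====
def pvCols (xs : List (Int × Int)) (k : Int) : List Int :=
  (xs.filter (fun p => p.1 == k)).map (fun p => p.2)

def pvGrp (xs : List (Int × Int)) : List (Int × List Int) :=
  (PySem.List.dedup (xs.map (fun p => p.1))).map (fun k => (k, pvCols xs k))

def pvStep (d : PySem.Dict Int (List Int)) (rc : Int × Int) : PySem.Dict Int (List Int) :=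
  d.modify rc.1 [] (fun l => l ++ [rc.2])

theorem pvFind?_beq_self (ks : List Int) (r : Int) (h : r ∈ ks) :
    ks.find? (fun k => k == r) = some r := by
  induction ks with
  | nil => cases h
  | cons a t ih =>
    by_cases ha : a = r
    · subst ha; simp
    · rw [List.find?_cons_of_neg (by simpa using ha)]
      rcases List.mem_cons.mp h with h' | h'
      · exact absurd h'.symm ha
      · exact ih h'

theorem pvCols_append (ys : List (Int × Int)) (rc : Int × Int) (k : Int) :
    pvCols (ys ++ [rc]) k = pvCols ys k ++ (if rc.1 == k then [rc.2] else []) := by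
  simp only [pvCols, List.filter_append, List.map_append]
  congr 1
  by_cases h : rc.1 = k <;> simp [h]

theorem pvDedup_append (l : List Int) (x : Int) :
    PySem.List.dedup (l ++ [x]) =
      if x ∈ l then PySem.List.dedup l else PySem.List.dedup l ++ [x] := by
  show PySem.Set.ofList (l ++ [x]) = _
  rw [PySem.Set.ofList, List.foldl_append]
  show PySem.Set.add (PySem.Set.ofList l) x = _
  rw [PySem.Set.add]
  by_cases h : x ∈ l
  · rw [if_pos ((PySem.Set.contains_iff _ _).mpr ((PySem.Set.mem_ofList l x).mpr h)), if_pos h]; rfl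
  · rw [if_neg (fun hc => h ((PySem.Set.mem_ofList l x).mp ((PySem.Set.contains_iff _ _).mp hc))), if_neg h]; rfl

theorem pvStep_grp (ys : List (Int × Int)) (rc : Int × Int) :
    (pvStep (PySem.Dict.mk (pvGrp ys)) rc).items = pvGrp (ys ++ [rc]) := by
  have hrows : (ys ++ [rc]).map (fun p => p.1) = ys.map (fun p => p.1) ++ [rc.1] := by simp
  by_cases hr : rc.1 ∈ ys.map (fun p => p.1)
  · have hks : rc.1 ∈ PySem.List.dedup (ys.map (fun p => p.1)) := by
      show rc.1 ∈ PySem.Set.ofList _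
      rw [PySem.Set.mem_ofList]; exact hr
    have hcont : ((pvGrp ys).any fun p => p.1 == rc.1) = true := by
      rw [List.any_eq_true]
      exact ⟨(rc.1, pvCols ys rc.1), List.mem_map_of_mem hks, by simp⟩
    have hfind : (pvGrp ys).find? (fun p => p.1 == rc.1) = some (rc.1, pvCols ys rc.1) := by
      rw [pvGrp, List.find?_map]
      have : (fun (p : Int × List Int) => p.1 == rc.1) ∘ (fun k => (k, pvCols ys k))
          = fun k => k == rc.1 := rfl
      rw [this, pvFind?_beq_self _ _ hks]
      rfl
    rw [pvStep, PySem.Dict.modify, PySem.Dict.insert]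
    simp only [PySem.Dict.contains, PySem.Dict.items, hcont, if_true,
      PySem.Dict.getD, PySem.Dict.get?, hfind, Option.map_some, Option.getD_some]
    conv_rhs => rw [pvGrp, hrows, pvDedup_append]
    rw [if_pos hr]
    conv_lhs => rw [pvGrp, List.map_map]
    apply List.map_congr_left
    intro k hk
    by_cases hkr : k = rc.1
    · subst hkr
      simp [pvCols_append]
    · have : (k == rc.1) = false := by simpa using hkr
      simp [Function.comp, this, pvCols_append, (by simpa using (Ne.symm hkr) : (rc.1 == k) = false)]
  · have hcont : ((pvGrp ys).any fun p => p.1 == rc.1) = false := by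
      rw [List.any_eq_false]
      rintro ⟨k, v⟩ hp
      rcases List.mem_map.mp (show (k, v) ∈ (PySem.List.dedup (ys.map (fun p => p.1))).map
          (fun k => (k, pvCols ys k)) from hp) with ⟨a, ha, hae⟩
      have hak : a = k := congrArg Prod.fst hae
      simp only [beq_iff_eq]
      intro hkr
      subst hkr
      exact hr ((PySem.Set.mem_ofList _ _).mp (hak ▸ ha))
    have hfind : (pvGrp ys).find? (fun p => p.1 == rc.1) = none :=
      List.find?_eq_none.mpr (by
        intro p hp
        exact (List.any_eq_false.mp hcont) p hp)
    have hcols : pvCols ys rc.1 = [] := by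
      rw [pvCols, List.filter_eq_nil_iff.mpr, List.map_nil]
      intro p hp
      simp only [beq_iff_eq]
      intro h
      exact hr (h ▸ List.mem_map_of_mem hp)
    rw [pvStep, PySem.Dict.modify, PySem.Dict.insert]
    simp only [PySem.Dict.contains, PySem.Dict.items, hcont, Bool.false_eq_true, if_false,
      PySem.Dict.getD, PySem.Dict.get?, hfind, Option.map_none, Option.getD_none]
    conv_rhs => rw [pvGrp, hrows, pvDedup_append]
    rw [if_neg hr, List.map_append]
    congr 1
    · apply List.map_congr_left
      intro k hk
      have hkr : ¬ rc.1 = k := by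
        intro h
        exact hr (h ▸ ((PySem.Set.mem_ofList _ _).mp hk))
      simp [pvCols_append, (by simpa using hkr : (rc.1 == k) = false)]
    · simp [pvCols_append, hcols]

theorem pvBuild_eq_grp (xs : List (Int × Int)) :
    (xs.foldl pvStep (PySem.Dict.mk [])).items = pvGrp xs := by
  induction xs using List.reverseRecOn with
  | nil => rfl
  | append_singleton ys rc ih =>
    rw [List.foldl_concat]
    have : ys.foldl pvStep (PySem.Dict.mk []) = PySem.Dict.mk (pvGrp ys) :=
      PySem.Dict.ext ih
    rw [this, pvStep_grp]

theorem pvFind?_nodup (L : List (Int × List Int)) (p : Int × List Int)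
    (hnd : (L.map (fun q => q.1)).Nodup) (hp : p ∈ L) :
    L.find? (fun q => q.1 == p.1) = some p := by
  induction L with
  | nil => cases hp
  | cons a t ih =>
    simp only [List.map_cons, List.nodup_cons] at hnd
    rcases List.mem_cons.mp hp with h' | h'
    · subst h'; simp
    · rw [List.find?_cons_of_neg]
      · exact ih hnd.2 h'
      · simp only [beq_iff_eq]
        intro heq
        exact hnd.1 (heq ▸ List.mem_map_of_mem h')

theorem pvKey_inj (L : List (Int × List Int)) (hnd : (L.map (fun q => q.1)).Nodup)
    {p q : Int × List Int} (hp : p ∈ L) (hq : q ∈ L) (h : p.1 = q.1) : p = q := by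
  have h1 := pvFind?_nodup L p hnd hp
  have h2 := pvFind?_nodup L q hnd hq
  rw [h] at h1
  rw [h1] at h2
  exact (Option.some_inj.mp h2)

theorem pvSortFold (ks : List Int) (L : List (Int × List Int))
    (hnd : (L.map (fun q => q.1)).Nodup) (hks : ∀ k ∈ ks, k ∈ L.map (fun q => q.1)) :
    (ks.foldl (fun d r => PySem.Dict.modify d r [] (fun l => PySem.List.sorted l (fun x => x)))
        (PySem.Dict.mk L)).items
      = L.map (fun p => if p.1 ∈ ks then (p.1, PySem.List.sorted p.2 (fun x => x)) else p) := by
  induction ks generalizing L with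
  | nil =>
    simp only [List.foldl_nil, List.not_mem_nil, if_false]
    exact (List.map_id'' (fun p => rfl) L).symm
  | cons k ks ih =>
    rcases List.mem_map.mp (hks k (List.mem_cons_self)) with ⟨q, hqL, hqk⟩
    have hcont : (L.any fun p => p.1 == k) = true :=
      List.any_eq_true.mpr ⟨q, hqL, by simp [hqk]⟩
    have hfind : L.find? (fun p => p.1 == k) = some q := by
      rw [← hqk]; exact pvFind?_nodup L q hnd hqL
    rw [List.foldl_cons]
    have hstep : PySem.Dict.modify (PySem.Dict.mk L) k [] (fun l => PySem.List.sorted l (fun x => x))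
        = PySem.Dict.mk (L.map (fun p => if p.1 == k then (k, PySem.List.sorted q.2 (fun x => x)) else p)) := by
      apply PySem.Dict.ext
      simp only [PySem.Dict.modify, PySem.Dict.insert, PySem.Dict.contains, PySem.Dict.getD,
        PySem.Dict.get?, PySem.Dict.items, hcont, if_true, hfind, Option.map_some, Option.getD_some]
    rw [hstep]
    set L' := L.map (fun p => if p.1 == k then (k, PySem.List.sorted q.2 (fun x => x)) else p) with hL'
    have hkeys : L'.map (fun p => p.1) = L.map (fun p => p.1) := by
      rw [hL', List.map_map]
      apply List.map_congr_left
      intro p hp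
      by_cases h : p.1 = k <;> simp [h]
    rw [ih L' (hkeys ▸ hnd) (fun a ha => hkeys ▸ hks a (List.mem_cons_of_mem _ ha))]
    rw [hL', List.map_map]
    apply List.map_congr_left
    intro p hp
    by_cases h : p.1 = k
    · have hpq : p = q := pvKey_inj L hnd hp hqL (h.trans hqk.symm)
      subst hpq
      by_cases h2 : p.1 ∈ ks <;>
        simp [h, h2, PySem.List.sorted_sorted, List.mem_cons]
    · by_cases h2 : p.1 ∈ ks <;>
        simp [h, h2, List.mem_cons]

theorem pvFoldlAdd_sublist (xs : List Int) : ∀ acc : List Int,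
    List.Sublist (xs.foldl PySem.Set.add acc) (acc ++ xs) := by
  induction xs with
  | nil => intro acc; simpa using List.Sublist.refl acc
  | cons x t ih =>
    intro acc
    rw [List.foldl_cons, PySem.Set.add]
    by_cases hc : PySem.Set.contains acc x = true
    · rw [if_pos hc]
      exact (ih acc).trans (List.Sublist.append_left (List.sublist_cons_self x t) acc)
    · rw [if_neg hc]
      have h := ih (acc ++ [x])
      rwa [List.append_assoc, List.singleton_append] at h

theorem pvCols_sorted (cells : List (Int × Int)) (k : Int) :
    pvCols (PySem.List.sorted cells (fun p => (toLex p : Lex (Int × Int)))) k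
      = PySem.List.sorted (pvCols cells k) (fun x => x) := by
  symm
  apply PySem.List.sorted_id_eq_of_perm_of_pairwise
  · exact ((PySem.List.sorted_perm cells (fun p => (toLex p : Lex (Int × Int))) false).filter _).map _
  · rw [pvCols, List.pairwise_map]
    have hp := PySem.List.sorted_pairwise cells (fun p => (toLex p : Lex (Int × Int)))
    have hf := List.Pairwise.sublist (List.filter_sublist
        (p := fun (p : Int × Int) => p.1 == k)
        (l := PySem.List.sorted cells (fun p => (toLex p : Lex (Int × Int))))) hp
    apply List.Pairwise.imp_of_mem ?_ hf
    intro a b ha hb hab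
    have hak : a.1 = k := by simpa using (List.mem_filter.mp ha).2
    have hbk : b.1 = k := by simpa using (List.mem_filter.mp hb).2
    rcases Prod.Lex.le_iff.mp hab with h | h
    · exact absurd (hak.trans hbk.symm) (ne_of_lt h)
    · exact h.2

theorem pvGrp_sorted_pairwise (cells : List (Int × Int)) :
    (PySem.List.dedup ((PySem.List.sorted cells (fun p => (toLex p : Lex (Int × Int)))).map
        (fun p => p.1))).Pairwise (· < ·) := by
  set rows := (PySem.List.sorted cells (fun p => (toLex p : Lex (Int × Int)))).map (fun p => p.1)
    with hrows
  have hple : rows.Pairwise (· ≤ ·) := by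
    rw [hrows, List.pairwise_map]
    apply List.Pairwise.imp ?_ (PySem.List.sorted_pairwise cells (fun p => (toLex p : Lex (Int × Int))))
    intro a b hab
    rcases Prod.Lex.le_iff.mp hab with h | h
    · exact le_of_lt h
    · exact le_of_eq h.1
  have hsub : List.Sublist (PySem.List.dedup rows) rows := by
    have := pvFoldlAdd_sublist rows []
    simpa using this
  have hle : (PySem.List.dedup rows).Pairwise (· ≤ ·) := List.Pairwise.sublist hsub hple
  have hnd : (PySem.List.dedup rows).Nodup := PySem.Set.nodup_ofList rows
  exact (hle.and hnd).imp (fun h => lt_of_le_of_ne h.1 h.2)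

theorem pvGrp_keys_nodup (xs : List (Int × Int)) :
    ((pvGrp xs).map (fun q => q.1)).Nodup := by
  have h : (pvGrp xs).map (fun q => q.1) = PySem.List.dedup (xs.map (fun p => p.1)) := by
    rw [pvGrp, List.map_map]; exact List.map_id'' (fun x => rfl) _
  rw [h]
  exact PySem.Set.nodup_ofList _

theorem pvStepA_eq (d : PySem.Dict Int (List Int)) (rc : Int × Int) :
    (let d' := if d.contains rc.1 then d else d.insert rc.1 []
     d'.modify rc.1 [] (fun l => l ++ [rc.2])) = d.modify rc.1 [] (fun l => l ++ [rc.2]) := by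
  show (if d.contains rc.1 then d else d.insert rc.1 []).modify rc.1 [] (fun l => l ++ [rc.2]) =
    d.modify rc.1 [] (fun l => l ++ [rc.2])
  by_cases h : d.contains rc.1
  · simp [h]
  · have hany : (d.items.any fun p => p.1 == rc.1) = false := by
      cases hc : (d.items.any fun p => p.1 == rc.1) with
      | false => rfl
      | true => exact absurd hc h
    have hne := List.any_eq_false.mp hany
    have hfind : d.items.find? (fun p => p.1 == rc.1) = none := List.find?_eq_none.mpr hne
    apply PySem.Dict.ext
    rw [if_neg h]
    simp only [PySem.Dict.modify, PySem.Dict.insert, PySem.Dict.getD, PySem.Dict.get?,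
      PySem.Dict.contains, hany, hfind, Bool.false_eq_true, if_false, List.any_append,
      List.find?_append, Option.none_or, List.any_cons, List.any_nil, beq_self_eq_true,
      if_true, List.find?_cons_of_pos, Option.map_some, Option.getD_some, Bool.false_or]
    simp only [List.map_append, List.map_cons, List.map_nil, beq_self_eq_true, if_true]
    congr 1
    have hmap : List.map (fun p => if (p.1 == rc.1) = true then (rc.1, ([] : List Int) ++ [rc.2]) else p) d.items
        = List.map id d.items := List.map_congr_left (fun p hp => by simp [hne p hp])
    simpa using hmap

-- ===== VERDICT (by name: the statement is the Claim_ definition above) =====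
theorem group_cells_by_row_spec : Claim_equal_group_cells_by_row := by
  intro cells _
  show group_cells_by_row cells = group_cells_by_row_alt cells
  have hstep : (fun (rows : PySem.Dict Int (List Int)) (rc : Int × Int) =>
      let rows := if rows.contains rc.1 then rows else rows.insert rc.1 []
      rows.modify rc.1 [] (fun l => l ++ [rc.2])) = pvStep :=
    funext fun d => funext fun rc => pvStepA_eq d rc
  set s := PySem.List.sorted cells (fun p => (toLex p : Lex (Int × Int))) with hs
  -- B
  have hB : group_cells_by_row_alt cells = pvGrp s := by
    rw [group_cells_by_row_alt]
    exact pvBuild_eq_grp s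
  -- A's first dict
  have hD : cells.foldl (fun (rows : PySem.Dict Int (List Int)) (rc : Int × Int) =>
      let rows := if rows.contains rc.1 then rows else rows.insert rc.1 []
      rows.modify rc.1 [] (fun l => l ++ [rc.2])) (PySem.Dict.mk [])
      = PySem.Dict.mk (pvGrp cells) := by
    rw [hstep]
    exact PySem.Dict.ext (pvBuild_eq_grp cells)
  have hkeys : ∀ k ∈ (PySem.Dict.mk (pvGrp cells)).keys, k ∈ (pvGrp cells).map (fun q => q.1) :=
    fun k hk => hk
  have hA : group_cells_by_row cells
      = PySem.List.sorted ((pvGrp cells).map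
          (fun p => (p.1, PySem.List.sorted p.2 (fun x => x)))) (fun p => p.1) := by
    rw [group_cells_by_row]
    simp only [hD]
    rw [pvSortFold _ _ (pvGrp_keys_nodup cells) hkeys]
    congr 1
    apply List.map_congr_left
    intro p hp
    rw [if_pos]
    show p.1 ∈ (pvGrp cells).map (fun q => q.1)
    exact List.mem_map_of_mem hp
  rw [hA, hB]
  -- both sides as maps over deduped rows
  have hvals : ∀ k, pvCols s k = PySem.List.sorted (pvCols cells k) (fun x => x) :=
    fun k => pvCols_sorted cells k
  have hBmap : pvGrp s = (PySem.List.dedup (s.map (fun p => p.1))).map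
      (fun k => (k, PySem.List.sorted (pvCols cells k) (fun x => x))) := by
    rw [pvGrp]
    exact List.map_congr_left (fun k _ => by rw [hvals k])
  have hAmap : (pvGrp cells).map (fun p => (p.1, PySem.List.sorted p.2 (fun x => x)))
      = (PySem.List.dedup (cells.map (fun p => p.1))).map
          (fun k => (k, PySem.List.sorted (pvCols cells k) (fun x => x))) := by
    rw [pvGrp, List.map_map]
    rfl
  apply PySem.List.sorted_eq_of_perm_of_pairwise_lt
  · -- pvGrp s is a permutation of the mapped items
    rw [hBmap, hAmap]
    apply List.Perm.map
    show List.Perm (PySem.Set.ofList (s.map (fun p => p.1))) (PySem.Set.ofList (cells.map (fun p => p.1)))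
    rw [List.perm_ext_iff_of_nodup (PySem.Set.nodup_ofList _) (PySem.Set.nodup_ofList _)]
    intro a
    rw [PySem.Set.mem_ofList, PySem.Set.mem_ofList]
    exact (PySem.List.sorted_perm cells (fun p => (toLex p : Lex (Int × Int))) false).map
      (fun p => p.1) |>.mem_iff
  · -- keys strictly increasing
    rw [hBmap, List.pairwise_map]
    exact pvGrp_sorted_pairwise cells
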